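-- pv_equiv track=rewrite | github.com/omerkeles15/ofk | backend/main.py | _get_delta_x_addresses
-- ===== SOURCE A (Python) =====
-- def _get_delta_x_addresses(count):
--     """Delta DVP X adresleri üret — oktal gruplama kuralı."""
--     addrs = []
--     if count <= 0:
--         return addrs
--     for i in range(8):
--         if len(addrs) >= count:
--             break
--         addrs.append(f"X{i}")
--     group = 2
--     while len(addrs) < count:
--         if group % 10 in (8, 9):
--             group += 1
--             continue
--         base = group * 10
--         for i in range(8):
--             if len(addrs) >= count:
--                 break
--             addrs.append(f"X{base + i}")
--         group += 1
--     return addrs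
-- ===== SOURCE B (Python) =====
-- def _get_delta_x_addresses(count):
--     """Closed form: the j-th address is computed directly from j (group index = j//8,
--     offset = j%8), with the k-th used group being 0 for k==0 and otherwise the k-th
--     number >= 2 whose last digit is below 8."""
--     def nth(j):
--         k, i = divmod(j, 8)
--         if k == 0:
--             g = 0
--         else:
--             m = k + 1
--             g = (m // 8) * 10 + m % 8
--         return f"X{g * 10 + i}"
--     return [nth(j) for j in range(count)]
-- ===== Notes on version B (the rewrite author's own statement) =====
-- stated objective: simpler
-- what changed: Replaces A's group-by-group loop with skip/break bookkeeping by a direct closed-form formula computing the j-th address from its index, mapped over range(count).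
import Mathlib
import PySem

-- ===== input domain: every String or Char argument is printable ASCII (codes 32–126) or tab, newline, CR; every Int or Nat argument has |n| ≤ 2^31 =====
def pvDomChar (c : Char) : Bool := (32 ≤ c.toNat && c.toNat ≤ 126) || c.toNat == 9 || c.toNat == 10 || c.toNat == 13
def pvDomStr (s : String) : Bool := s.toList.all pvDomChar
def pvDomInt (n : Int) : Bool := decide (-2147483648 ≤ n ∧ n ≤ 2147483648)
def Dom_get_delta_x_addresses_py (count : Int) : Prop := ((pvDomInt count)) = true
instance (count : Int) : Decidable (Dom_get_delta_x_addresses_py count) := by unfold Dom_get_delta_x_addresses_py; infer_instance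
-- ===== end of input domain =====

-- B replaces A's group-by-group loop (with 8/9 skipping and breaks) by a closed-form
-- formula for the j-th address mapped over range(count); same output, no speed claim.

-- ===== PORT A =====
-- the shape 'for i in range(8): if len(addrs) >= count: break; addrs.append(f(i))'
-- shared by A's two for-loops (f is the f-string body)
def pvForAppend (count : Int) (f : Int → String) (addrs : List String) : List Int → List String
  | [] => addrs
  | i :: rest =>
    if (addrs.length : Int) ≥ count then addrs
    else pvForAppend count f (addrs ++ [f i]) rest

-- facts the while-loop's termination measure cites
lemma pvForAppend_len_ge (count : Int) (f : Int → String) :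
    ∀ (is : List Int) (addrs : List String), addrs.length ≤ (pvForAppend count f addrs is).length := by
  intro is
  induction is with
  | nil => intro addrs; simp [pvForAppend]
  | cons i rest ih =>
    intro addrs
    rw [pvForAppend]
    split
    · exact le_refl _
    · exact le_trans (by simp) (ih (addrs ++ [f i]))

lemma pvForAppend_len_gt (count : Int) (f : Int → String) (i : Int) (rest : List Int)
    (addrs : List String) (h : (addrs.length : Int) < count) :
    addrs.length < (pvForAppend count f addrs (i :: rest)).length := by
  rw [pvForAppend]
  split
  · omega
  · exact lt_of_lt_of_le (by simp) (pvForAppend_len_ge count f rest (addrs ++ [f i]))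

lemma pvRange8 : PySem.List.pyRange 0 8 1 = [0, 1, 2, 3, 4, 5, 6, 7] := by decide

-- the two decrease facts for the while-loop's termination measure
lemma pvDecSkip (count : Int) (len : Nat) (g : Int) (_h : (len : Int) < count)
    (hm : PySem.Int.mod g 10 = 8 ∨ PySem.Int.mod g 10 = 9) :
    (count - (len : Int)).toNat * 3 +
      (if PySem.Int.mod (g + 1) 10 = 8 then 2 else if PySem.Int.mod (g + 1) 10 = 9 then 1 else 0) <
    (count - (len : Int)).toNat * 3 +
      (if PySem.Int.mod g 10 = 8 then 2 else if PySem.Int.mod g 10 = 9 then 1 else 0) := by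
  have hme : ∀ a : Int, PySem.Int.mod a 10 = a % 10 := fun a => PySem.Int.mod_eq_emod_of_pos (by norm_num)
  rcases hm with hm | hm
  · rw [hme] at hm
    have h9 : (g + 1) % 10 = 9 := by omega
    simp [hm, h9]
  · rw [hme] at hm
    have a1 : (g + 1) % 10 ≠ 8 := by omega
    have a2 : (g + 1) % 10 ≠ 9 := by omega
    simp [hm, a1, a2]

lemma pvDecStep (count : Int) (len len' : Nat) (g : Int) (h : (len : Int) < count)
    (hlen : len < len') :
    (count - (len' : Int)).toNat * 3 +
      (if PySem.Int.mod (g + 1) 10 = 8 then 2 else if PySem.Int.mod (g + 1) 10 = 9 then 1 else 0) <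
    (count - (len : Int)).toNat * 3 +
      (if PySem.Int.mod g 10 = 8 then 2 else if PySem.Int.mod g 10 = 9 then 1 else 0) := by
  have hkey : (count - (len' : Int)).toNat + 1 ≤ (count - (len : Int)).toNat := by omega
  split_ifs <;> omega

def pvWhile (count : Int) (addrs : List String) (group : Int) : List String :=
  if h : (addrs.length : Int) < count then
    if hm : PySem.Int.mod group 10 = 8 ∨ PySem.Int.mod group 10 = 9 then
      pvWhile count addrs (group + 1)
    else
      pvWhile count
        (pvForAppend count (fun i => "X" ++ PySem.Int.toStr (group * 10 + i)) addrs (PySem.List.pyRange 0 8 1))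
        (group + 1)
  else addrs
termination_by (count - addrs.length).toNat * 3 +
    (if PySem.Int.mod group 10 = 8 then 2 else if PySem.Int.mod group 10 = 9 then 1 else 0)
decreasing_by
  · exact pvDecSkip count addrs.length group h hm
  · exact pvDecStep count addrs.length _ group h
      (by rw [pvRange8]; exact pvForAppend_len_gt count _ 0 _ addrs h)

def get_delta_x_addresses_py (count : Int) : List String :=
  if count ≤ 0 then []
  else
    let addrs := pvForAppend count (fun i => "X" ++ PySem.Int.toStr i) [] (PySem.List.pyRange 0 8 1)
    pvWhile count addrs 2

-- ===== PORT B =====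
def pvNth (j : Int) : String :=
  let k := PySem.Int.floordiv j 8
  let i := PySem.Int.mod j 8
  let g := if k = 0 then (0 : Int)
           else PySem.Int.floordiv (k + 1) 8 * 10 + PySem.Int.mod (k + 1) 8
  "X" ++ PySem.Int.toStr (g * 10 + i)

def get_delta_x_addresses_py_alt (count : Int) : List String :=
  (PySem.List.pyRange 0 count 1).map pvNth

-- ===== PRECONDITION & SPEC =====
def Spec_get_delta_x_addresses_py (count : Int) (out : List String) : Prop := out = get_delta_x_addresses_py_alt count
instance (count : Int) (out : List String) : Decidable (Spec_get_delta_x_addresses_py count out) := by unfold Spec_get_delta_x_addresses_py; infer_instance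

-- ===== CLAIM (what is proved, stated in full; the proofs are below) =====
def Claim_equal_get_delta_x_addresses_py : Prop := ∀ (count : Int), Dom_get_delta_x_addresses_py count → Spec_get_delta_x_addresses_py count (get_delta_x_addresses_py count)

-- ===== LEMMAS AND PROOFS =====

lemma pvMod10_succ8 (g : Int) (h : PySem.Int.mod g 10 = 8) : PySem.Int.mod (g + 1) 10 = 9 := by
  rw [PySem.Int.mod_eq_emod_of_pos (by norm_num)] at h ⊢; omega

-- the canonical first-n prefix of B's address stream
def pvPrefix (n : Nat) : List String := (List.range n).map (fun (j : Nat) => pvNth (j : Int))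

-- the group used for chunk k (k ≥ 1) by A's while loop
def pvGIdx (k : Nat) : Int := (((k + 1) / 8 : Nat) : Int) * 10 + (((k + 1) % 8 : Nat) : Int)

lemma pvPrefix_length (n : Nat) : (pvPrefix n).length = n := by simp [pvPrefix]

lemma pvPrefix_add (L m : Nat) :
    pvPrefix (L + m) = pvPrefix L ++ (List.range m).map (fun (j : Nat) => pvNth ((L + j : Nat) : Int)) := by
  rw [pvPrefix, pvPrefix, List.range_add, List.map_append, List.map_map]
  rfl

lemma pvForAppend_spec (count : Int) (f : Int → String) :
    ∀ (is : List Int) (addrs : List String),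
      pvForAppend count f addrs is = addrs ++ (is.map f).take (count - addrs.length).toNat := by
  intro is
  induction is with
  | nil => intro addrs; simp [pvForAppend]
  | cons i rest ih =>
    intro addrs
    rw [pvForAppend]
    split
    · have : (count - (addrs.length : Int)).toNat = 0 := by omega
      simp [this]
    · rw [ih (addrs ++ [f i])]
      have h1 : (count - ((addrs ++ [f i]).length : Int)).toNat + 1 = (count - (addrs.length : Int)).toNat := by
        simp; omega
      rw [← h1]
      simp [List.take_succ_cons]

lemma pvNth_def (j : Int) :
    pvNth j = "X" ++ PySem.Int.toStr
      ((if PySem.Int.floordiv j 8 = 0 then (0 : Int)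
        else PySem.Int.floordiv (PySem.Int.floordiv j 8 + 1) 8 * 10 +
          PySem.Int.mod (PySem.Int.floordiv j 8 + 1) 8) * 10 + PySem.Int.mod j 8) := rfl

lemma pvNth_small (j : Nat) (hj : j < 8) : pvNth (j : Int) = "X" ++ PySem.Int.toStr (j : Int) := by
  rw [pvNth_def]
  have h1 : PySem.Int.floordiv (j : Int) 8 = ((j / 8 : Nat) : Int) := by
    exact_mod_cast PySem.Int.floordiv_natCast j 8
  have h2 : PySem.Int.mod (j : Int) 8 = ((j % 8 : Nat) : Int) := by
    exact_mod_cast PySem.Int.mod_natCast j 8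
  have hd : j / 8 = 0 := by omega
  have hm : j % 8 = j := by omega
  rw [h1, h2, hd, hm]
  norm_num

lemma pvNth_chunk (k j : Nat) (hk : 1 ≤ k) (hj : j < 8) :
    pvNth ((8 * k + j : Nat) : Int) = "X" ++ PySem.Int.toStr (pvGIdx k * 10 + (j : Int)) := by
  rw [pvNth_def]
  have h1 : PySem.Int.floordiv ((8 * k + j : Nat) : Int) 8 = (((8 * k + j) / 8 : Nat) : Int) := by
    exact_mod_cast PySem.Int.floordiv_natCast (8 * k + j) 8
  have h2 : PySem.Int.mod ((8 * k + j : Nat) : Int) 8 = (((8 * k + j) % 8 : Nat) : Int) := by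
    exact_mod_cast PySem.Int.mod_natCast (8 * k + j) 8
  have hd : (8 * k + j) / 8 = k := by omega
  have hm : (8 * k + j) % 8 = j := by omega
  have hk0 : ((k : Int)) ≠ 0 := by exact_mod_cast Nat.one_le_iff_ne_zero.mp hk
  have h3 : ((k : Int) + 1) = ((k + 1 : Nat) : Int) := by push_cast; ring
  have h4 : PySem.Int.floordiv ((k + 1 : Nat) : Int) 8 = (((k + 1) / 8 : Nat) : Int) := by
    exact_mod_cast PySem.Int.floordiv_natCast (k + 1) 8
  have h5 : PySem.Int.mod ((k + 1 : Nat) : Int) 8 = (((k + 1) % 8 : Nat) : Int) := by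
    exact_mod_cast PySem.Int.mod_natCast (k + 1) 8
  rw [h1, h2, hd, hm, if_neg hk0, h3, h4, h5]
  rfl

lemma pvChunk_eq (k : Nat) (hk : 1 ≤ k) :
    (PySem.List.pyRange 0 8 1).map (fun i => "X" ++ PySem.Int.toStr (pvGIdx k * 10 + i)) =
    (List.range 8).map (fun (j : Nat) => pvNth ((8 * k + j : Nat) : Int)) := by
  rw [pvRange8]
  apply List.ext_getElem
  · simp
  · intro n h1 h2
    have hn : n < 8 := by simpa using h2
    simp only [List.getElem_map, List.getElem_range]
    rw [pvNth_chunk k n hk hn]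
    interval_cases n <;> norm_num

lemma pvFirstChunk_eq :
    (PySem.List.pyRange 0 8 1).map (fun i => "X" ++ PySem.Int.toStr i) =
    (List.range 8).map (fun (j : Nat) => pvNth (j : Int)) := by
  rw [pvRange8]
  apply List.ext_getElem
  · simp
  · intro n h1 h2
    have hn : n < 8 := by simpa using h2
    simp only [List.getElem_map, List.getElem_range]
    rw [pvNth_small n hn]
    interval_cases n <;> norm_num

lemma pvGIdx_mod (k : Nat) : PySem.Int.mod (pvGIdx k) 10 ≠ 8 ∧ PySem.Int.mod (pvGIdx k) 10 ≠ 9 := by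
  unfold pvGIdx
  rw [PySem.Int.mod_eq_emod_of_pos (by norm_num)]
  have := Nat.mod_lt (k + 1) (y := 8) (by norm_num)
  omega

lemma pvGIdx_succ (k : Nat) (_hk : 1 ≤ k) :
    pvGIdx k + 1 = pvGIdx (k + 1) ∨
      (pvGIdx k + 1 + 2 = pvGIdx (k + 1) ∧ PySem.Int.mod (pvGIdx k + 1) 10 = 8) := by
  unfold pvGIdx
  rw [PySem.Int.mod_eq_emod_of_pos (by norm_num)]
  by_cases h : (k + 1) % 8 = 7
  · right; constructor <;> [skip; skip] <;> omega
  · left; omega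

lemma pvWhile_exit (count : Int) (addrs : List String) (γ : Int)
    (h : ¬ ((addrs.length : Int) < count)) : pvWhile count addrs γ = addrs := by
  rw [pvWhile]; simp [h]

lemma pvWhile_key (count : Int) :
    ∀ (d k : Nat) (γ : Int), 1 ≤ k → (8 * (k : Int)) ≤ count → count.toNat ≤ 8 * k + d →
      (γ = pvGIdx k ∨ (γ + 1 = pvGIdx k ∧ PySem.Int.mod γ 10 = 9) ∨
        (γ + 2 = pvGIdx k ∧ PySem.Int.mod γ 10 = 8)) →
      pvWhile count (pvPrefix (8 * k)) γ = pvPrefix count.toNat := by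
  intro d
  induction d using Nat.strong_induction_on with
  | h d ih =>
    intro k γ hk hle hd hγ
    by_cases hlt : ((pvPrefix (8 * k)).length : Int) < count
    case neg =>
      have hlen : (pvPrefix (8 * k)).length = 8 * k := pvPrefix_length _
      have : count.toNat = 8 * k := by omega
      rw [pvWhile_exit count _ γ hlt, this]
    case pos =>
      have hlen : (pvPrefix (8 * k)).length = 8 * k := pvPrefix_length _
      -- core case: the loop is at the valid group pvGIdx k
      have key : pvWhile count (pvPrefix (8 * k)) (pvGIdx k) = pvPrefix count.toNat := by
        have hmod := pvGIdx_mod k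
        rw [pvWhile]
        simp only [hlt, dite_true, hmod.1, hmod.2, or_self, dite_false]
        rw [pvForAppend_spec, pvChunk_eq k hk, ← List.map_take, List.take_range]
        set t : Nat := (count - ((pvPrefix (8 * k)).length : Int)).toNat with ht
        have htpos : 1 ≤ t := by rw [ht]; omega
        by_cases h8 : t ≤ 8
        · have hmin : min t 8 = t := by omega
          have hcnt : 8 * k + t = count.toNat := by rw [ht, hlen]; omega
          rw [hmin, ← pvPrefix_add, hcnt]
          apply pvWhile_exit
          rw [pvPrefix_length]
          omega
        · have hmin : min t 8 = 8 := by omega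
          have hsz : 8 * k + 8 = 8 * (k + 1) := by ring
          rw [hmin, ← pvPrefix_add, hsz]
          have hle' : (8 * ((k + 1 : Nat) : Int)) ≤ count := by
            push_cast
            rw [ht, hlen] at h8
            omega
          have hd' : count.toNat ≤ 8 * (k + 1) + (d - 8) := by
            rw [ht, hlen] at h8
            omega
          have hdlt : d - 8 < d := by
            rw [ht, hlen] at h8
            omega
          rcases pvGIdx_succ k hk with hs | hs
          · exact ih (d - 8) hdlt (k + 1) (pvGIdx k + 1) (by omega) hle' hd' (Or.inl hs)
          · exact ih (d - 8) hdlt (k + 1) (pvGIdx k + 1) (by omega) hle' hd'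
              (Or.inr (Or.inr ⟨hs.1, hs.2⟩))
      rcases hγ with hγ | ⟨hγ, hm9⟩ | ⟨hγ, hm8⟩
      · rw [hγ]; exact key
      · rw [pvWhile, dif_pos hlt, dif_pos (Or.inr hm9), hγ]
        exact key
      · have hm9 : PySem.Int.mod (γ + 1) 10 = 9 := pvMod10_succ8 γ hm8
        rw [pvWhile, dif_pos hlt, dif_pos (Or.inl hm8),
          pvWhile, dif_pos hlt, dif_pos (Or.inr hm9)]
        have h2 : γ + 1 + 1 = pvGIdx k := by omega
        rw [h2]
        exact key

lemma pvAlt_eq (count : Int) : get_delta_x_addresses_py_alt count = pvPrefix count.toNat := by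
  unfold get_delta_x_addresses_py_alt pvPrefix
  rw [PySem.List.pyRange_one, List.map_map, sub_zero]
  apply List.map_congr_left
  intro x _
  simp [Function.comp]

lemma pvGIdx_one : pvGIdx 1 = 2 := by decide

-- ===== VERDICT (by name: the statement is the Claim_ definition above) =====
theorem get_delta_x_addresses_py_spec : Claim_equal_get_delta_x_addresses_py := by
  intro count _
  unfold Spec_get_delta_x_addresses_py
  rw [pvAlt_eq]
  unfold get_delta_x_addresses_py
  by_cases h0 : count ≤ 0
  · have : count.toNat = 0 := by omega
    simp [h0, this, pvPrefix]
  · simp only [h0, if_false]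
    rw [pvForAppend_spec, pvFirstChunk_eq, ← List.map_take, List.take_range]
    have hnil : ((([] : List String)).length : Int) = 0 := by simp
    simp only [List.length_nil, Nat.cast_zero, sub_zero, List.nil_append]
    by_cases h8 : count ≤ 8
    · have hmin : min count.toNat 8 = count.toNat := by omega
      rw [hmin]
      show pvWhile count (pvPrefix count.toNat) 2 = pvPrefix count.toNat
      apply pvWhile_exit
      rw [pvPrefix_length]
      omega
    · have hmin : min count.toNat 8 = 8 := by omega
      rw [hmin]
      have h81 : (8 : Nat) = 8 * 1 := by norm_num
      show pvWhile count (pvPrefix 8) 2 = pvPrefix count.toNat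
      rw [h81]
      exact pvWhile_key count count.toNat 1 2 (le_refl 1) (by push_cast; omega)
        (by omega) (Or.inl (by rw [pvGIdx_one]))
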